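-- pv_equiv track=rewrite | github.com/port-labs/ocean | integrations/azure/azure_integration/utils.py | resolve_resource_type_from_resource_uri
-- ===== SOURCE A (Python) =====
-- import enum
--
-- class ResourceKindsWithSpecialHandling(enum.StrEnum):
--     """
--     Resource kinds with special handling
--     These resource kinds are handled separately from the other resource kinds
--     """
--
--     RESOURCE_GROUPS = "Microsoft.Resources/resourceGroups"
--     SUBSCRIPTION = "subscription"
--     CLOUD_RESOURCE = "cloudResource"
--
-- def resolve_resource_type_from_resource_uri(resource_uri: str) -> str:
--     """
--     Resolves the resource type from azure resource uri
--
--     example of resource_uri: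
--     /subscriptions/00000000-0000-0000-0000-000000000000/resourceGroups/myResourceGroup/providers/Microsoft.Compute/virtualMachines/myVM
--
--     pattern: /subscriptions/{subscriptionId}/resourceGroups/{resourceGroupName}/providers/{resourceProviderNamespace}/{resourceType}/{resourceName}
--
--     :param resource_uri: Azure resource uri
--     :return: Resource type
--     """
--     resource = resource_uri.split("/")
--     if len(resource) < 8:
--         # Assuming that it is a resource group and not a resource
--         # example: /subscriptions/00000000-0000-0000-0000-000000000000/resourceGroups/myResourceGroup
--         return ResourceKindsWithSpecialHandling.RESOURCE_GROUPS
--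
--     elif len(resource) == 8:
--         # Assuming that it is a resource
--         resource_type = "/".join(resource[6:])
--     else:
--         # Assuming that it is an extension resource (e.g Microsoft.Storage/storageAccounts/blobServices/containers)
--         # For that we need to remove the parent resources names from the resource uri to construct the resource type
--         # example:
--         # resource_uri = /subscriptions/00000000-0000-0000-0000-000000000000/resourceGroups/myResourceGroup/providers/Microsoft.Storage/storageAccounts/myStorageAccount/blobServices/default/containers/myContainer
--         # resource_type = Microsoft.Storage/storageAccounts/blobServices/containers
--         resource_type = "/".join(resource[6:8])
--         # start from the first extension resource kind
--         for resource_kind_extension in range(len(resource[9:])):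
--             # we want to skip the resource name and only add the extension resource kinds
--             if resource_kind_extension % 2 == 0:
--                 resource_type += "/" + resource[9:][resource_kind_extension]
--
--     return resource_type
-- ===== SOURCE B (Python) =====
-- def resolve_resource_type_from_resource_uri(resource_uri: str) -> str:
--     resource = resource_uri.split("/")
--     if len(resource) < 8:
--         return "Microsoft.Resources/resourceGroups"
--     return "/".join(resource[6:8] + resource[9::2])
-- ===== Notes on version B (the rewrite author's own statement) =====
-- stated objective: simpler
-- what changed: Merged the ==8 and >8 branches into one expression that joins resource[6:8] with the step-2 slice resource[9::2], removing the modulo-indexed accumulation loop.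
import Mathlib
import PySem

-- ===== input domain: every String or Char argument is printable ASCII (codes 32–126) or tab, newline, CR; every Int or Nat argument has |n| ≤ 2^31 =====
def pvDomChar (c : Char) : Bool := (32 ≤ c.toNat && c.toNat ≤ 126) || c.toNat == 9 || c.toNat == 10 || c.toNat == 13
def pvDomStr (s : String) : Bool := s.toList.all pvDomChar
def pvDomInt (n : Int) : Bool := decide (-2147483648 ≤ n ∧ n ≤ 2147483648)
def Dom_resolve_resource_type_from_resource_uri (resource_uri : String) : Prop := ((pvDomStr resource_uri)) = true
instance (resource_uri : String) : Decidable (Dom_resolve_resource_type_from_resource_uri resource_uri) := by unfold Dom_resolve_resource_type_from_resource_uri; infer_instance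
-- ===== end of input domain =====

-- B merges A's ==8 and >8 branches into one join over resource[6:8] ++ resource[9::2], removing the modulo-indexed loop (objective: simpler).


-- ===== PORT A =====
-- resource[9:][i] is always in range when the loop runs, so pyGetD with default "" is exact here.
def resolve_resource_type_from_resource_uri (resource_uri : String) : String :=
  let resource := (PySem.Str.split? resource_uri "/").getD []
  if resource.length < 8 then
    "Microsoft.Resources/resourceGroups"
  else if resource.length = 8 then
    PySem.Str.join "/" (PySem.List.slice resource (some 6) none)
  else
    let tail9 := PySem.List.slice resource (some 9) none
    (PySem.List.pyRange 0 (tail9.length : Int) 1).foldl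
      (fun acc i =>
        if PySem.Int.mod i 2 = 0 then acc ++ "/" ++ PySem.List.pyGetD tail9 i "" else acc)
      (PySem.Str.join "/" (PySem.List.slice resource (some 6) (some 8)))

-- ===== PORT B =====
def resolve_resource_type_from_resource_uri_alt (resource_uri : String) : String :=
  let resource := (PySem.Str.split? resource_uri "/").getD []
  if resource.length < 8 then
    "Microsoft.Resources/resourceGroups"
  else
    PySem.Str.join "/"
      (PySem.List.slice resource (some 6) (some 8) ++
       (PySem.List.slice? resource (some 9) none 2).getD [])

-- ===== PRECONDITION & SPEC =====
def Spec_resolve_resource_type_from_resource_uri (resource_uri : String) (out : String) : Prop := out = resolve_resource_type_from_resource_uri_alt resource_uri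
instance (resource_uri : String) (out : String) : Decidable (Spec_resolve_resource_type_from_resource_uri resource_uri out) := by unfold Spec_resolve_resource_type_from_resource_uri; infer_instance

-- ===== CLAIM (what is proved, stated in full; the proofs are below) =====
def Claim_equal_resolve_resource_type_from_resource_uri : Prop := ∀ (resource_uri : String), Dom_resolve_resource_type_from_resource_uri resource_uri → Spec_resolve_resource_type_from_resource_uri resource_uri (resolve_resource_type_from_resource_uri resource_uri)

-- ===== LEMMAS AND PROOFS =====

-- every second element of a list, starting with the first (what xs[0::2] keeps)
def pvEvens {α : Type} : List α → List α
  | [] => []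
  | [x] => [x]
  | x :: _ :: rest => x :: pvEvens rest

-- "/".join(p :: ys) written as p followed by '/'-prefixed pieces
def pvGlue : List String → String
  | [] => ""
  | x :: ys => "/" ++ x ++ pvGlue ys

theorem pv_join_eq_glue (p : String) (ys : List String) :
    PySem.Str.join "/" (p :: ys) = p ++ pvGlue ys := by
  induction ys generalizing p with
  | nil =>
    apply String.ext
    simp [PySem.Str.join, PySem.Chars.join_singleton, pvGlue, String.ofList]
  | cons q ys ih =>
    apply String.ext
    have h := congrArg String.toList (ih q)
    simp only [PySem.Str.join, List.map_cons] at h ⊢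
    rw [PySem.Chars.join_cons_cons]
    simp at h
    simp [pvGlue, h]

theorem pv_filterMap_even {α : Type} (d : List α) :
    (List.range ((d.length + 1) / 2)).filterMap (fun k => d[2 * k]?) = pvEvens d := by
  induction d using pvEvens.induct with
  | case1 => simp [pvEvens]
  | case2 x => simp [pvEvens]
  | case3 x y rest ih =>
    have hlen : ((x :: y :: rest).length + 1) / 2 = (rest.length + 1) / 2 + 1 := by
      simp [List.length_cons]; omega
    rw [hlen, List.range_succ_eq_map, List.filterMap_cons, List.filterMap_map]
    simp only [Nat.mul_zero, List.getElem?_cons_zero]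
    have : ∀ k : Nat, (x :: y :: rest)[2 * Nat.succ k]? = rest[2 * k]? := by
      intro k
      have : 2 * Nat.succ k = (2 * k) + 2 := by omega
      simp [this]
    simp only [Function.comp_def, this]
    rw [show (fun k => rest[2*k]?) = (fun k => rest[2*k]?) from rfl]
    simp [pvEvens, ih]

theorem pv_foldl_even (d : List String) (s : Nat) (init : String) :
    (PySem.List.enumerate d (2 * (s : Int))).foldl
      (fun acc p => if PySem.Int.mod p.1 2 = 0 then acc ++ "/" ++ p.2 else acc) init
    = init ++ pvGlue (pvEvens d) := by
  induction d using pvEvens.induct generalizing s init with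
  | case1 => simp [PySem.List.enumerate_nil, pvEvens, pvGlue]
  | case2 x =>
    have hm : PySem.Int.mod (2 * (s : Int)) 2 = 0 := by
      rw [PySem.Int.mod_eq_zero_iff_dvd]; exact ⟨s, by ring⟩
    simp [PySem.List.enumerate_cons, PySem.List.enumerate_nil, pvEvens, pvGlue,
      String.append_assoc]
  | case3 x y rest ih =>
    have hm : PySem.Int.mod (2 * (s : Int)) 2 = 0 := by
      rw [PySem.Int.mod_eq_zero_iff_dvd]; exact ⟨s, by ring⟩
    have hm1 : PySem.Int.mod (2 * (s : Int) + 1) 2 ≠ 0 := by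
      rw [Ne, PySem.Int.mod_eq_zero_iff_dvd]; omega
    rw [PySem.List.enumerate_cons, PySem.List.enumerate_cons]
    simp only [List.foldl_cons, hm, if_true, if_neg hm1]
    have h2 : 2 * (s : Int) + 1 + 1 = 2 * ((s + 1 : Nat) : Int) := by push_cast; ring
    rw [h2, ih (s + 1) (init ++ "/" ++ x)]
    apply String.ext
    simp [pvEvens, pvGlue]

theorem pv_foldl_even0 (d : List String) (init : String) :
    (PySem.List.enumerate d 0).foldl
      (fun acc p => if PySem.Int.mod p.1 2 = 0 then acc ++ "/" ++ p.2 else acc) init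
    = init ++ pvGlue (pvEvens d) := by
  simpa using pv_foldl_even d 0 init

-- the step-2 tail slice is pvEvens of the drop
theorem pv_slice2_drop {α : Type} (l : List α) :
    (PySem.List.slice? l (some 9) none 2).getD [] = pvEvens (l.drop 9) := by
  by_cases h : 9 ≤ l.length
  · have hs : PySem.List.sliceIndices l.length (some 9) none 2 = (9, (l.length : Int), 2) := by
      simp [PySem.List.sliceIndices]
      try omega
    simp only [PySem.List.slice?, if_neg (by norm_num : (2:Int) ≠ 0), hs]
    have hcount : (((l.length : Int) - 9 + 2 - 1) / 2).toNat = ((l.drop 9).length + 1) / 2 := by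
      simp [List.length_drop]; omega
    have hlt : (9 : Int) < (l.length : Int) ∨ ¬ (9:Int) < l.length := em _
    rcases hlt with hlt | hlt
    · simp only [if_pos hlt, hcount]
      have hidx : ∀ k : Nat, l[((9:Int) + 2 * (k:Int)).toNat]? = (l.drop 9)[2 * k]? := by
        intro k
        rw [List.getElem?_drop]
        have hk : ((9:Int) + 2 * (k:Int)).toNat = 9 + 2 * k := by omega
        rw [hk]
      rw [show (fun k : Nat => l[((9:Int) + 2 * (k:Int)).toNat]?) = (fun k : Nat => (l.drop 9)[2 * k]?) from funext hidx]
      exact pv_filterMap_even _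
    · -- length = 9: slice is a single element
      have h9 : l.length = 9 := by omega
      simp only [if_neg hlt]
      simp [List.drop_eq_nil_of_le (by omega : l.length ≤ 9), pvEvens]
  · have hlen : ((l.length : Int)) ≤ 9 := by exact_mod_cast Nat.le_of_lt (Nat.lt_of_not_le h)
    have hs : PySem.List.sliceIndices l.length (some 9) none 2 = ((l.length : Int), (l.length : Int), 2) := by
      simp [PySem.List.sliceIndices]
      try omega
    simp only [PySem.List.slice?, if_neg (by norm_num : (2:Int) ≠ 0), hs]
    simp [List.drop_eq_nil_of_le (by omega : l.length ≤ 9), pvEvens]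

-- core equivalence on the split list
theorem pv_core (l : List String) (h8 : ¬ l.length < 8) :
    (if l.length = 8 then
      PySem.Str.join "/" (PySem.List.slice l (some 6) none)
    else
      (PySem.List.pyRange 0 ((PySem.List.slice l (some 9) none).length : Int) 1).foldl
        (fun acc i =>
          if PySem.Int.mod i 2 = 0 then acc ++ "/" ++ PySem.List.pyGetD (PySem.List.slice l (some 9) none) i "" else acc)
        (PySem.Str.join "/" (PySem.List.slice l (some 6) (some 8))))
    = PySem.Str.join "/"
        (PySem.List.slice l (some 6) (some 8) ++
         (PySem.List.slice? l (some 9) none 2).getD []) := by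
  have h68 : PySem.List.slice l (some 6) (some 8) = (l.drop 6).take 2 := by
    rw [PySem.List.slice_toNat l (by norm_num) (by norm_num)]
    simp
  have h6 : PySem.List.slice l (some 6) none = l.drop 6 := by
    rw [PySem.List.slice_from l (by norm_num)]; simp
  have h9 : PySem.List.slice l (some 9) none = l.drop 9 := by
    rw [PySem.List.slice_from l (by norm_num)]; simp
  -- l.drop 6 has at least 2 elements
  match hd : l.drop 6 with
  | [] => exfalso; have := congrArg List.length hd; simp [List.length_drop] at this; omega
  | [a] => exfalso; have := congrArg List.length hd; simp [List.length_drop] at this; omega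
  | a :: b :: rest =>
    have hrest : l.drop 8 = rest := by
      have : l.drop 8 = (l.drop 6).drop 2 := by rw [List.drop_drop]
      rw [this, hd]; rfl
    have hdrop9 : l.drop 9 = rest.drop 1 := by
      have : l.drop 9 = (l.drop 8).drop 1 := by rw [List.drop_drop]
      rw [this, hrest]
    rw [pv_slice2_drop, h68, h6, h9, hd, hdrop9]
    by_cases he : l.length = 8
    · have hnil : rest = [] := by
        have hlen := congrArg List.length hd
        simp only [List.length_drop, List.length_cons, he] at hlen
        exact List.eq_nil_of_length_eq_zero (by omega)
      subst hnil
      simp only [if_pos he, List.drop_nil, pvEvens, List.append_nil]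
      rfl
    · simp only [if_neg he]
      -- rewrite the pyRange foldl as a foldl over enumerate
      have hen := PySem.List.enumerate_eq_map_pyRange (rest.drop 1) ""
      have hfold :
          (PySem.List.pyRange 0 ((rest.drop 1).length : Int) 1).foldl
            (fun acc i => if PySem.Int.mod i 2 = 0 then acc ++ "/" ++ PySem.List.pyGetD (rest.drop 1) i "" else acc)
            (PySem.Str.join "/" ((a :: b :: rest).take 2))
          = (PySem.List.enumerate (rest.drop 1) 0).foldl
            (fun acc p => if PySem.Int.mod p.1 2 = 0 then acc ++ "/" ++ p.2 else acc)
            (PySem.Str.join "/" ((a :: b :: rest).take 2)) := by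
        rw [hen, List.foldl_map]
        rfl
      rw [hfold]
      rw [pv_foldl_even0]
      -- both sides are join of (a :: b :: evens)
      have htake : (a :: b :: rest).take 2 = [a, b] := rfl
      rw [htake]
      simp only [List.cons_append, List.nil_append]
      rw [pv_join_eq_glue a (b :: pvEvens (rest.drop 1))]
      rw [pv_join_eq_glue a [b]]
      simp [pvGlue]
      apply String.ext
      simp

-- ===== VERDICT (by name: the statement is the Claim_ definition above) =====
theorem resolve_resource_type_from_resource_uri_spec : Claim_equal_resolve_resource_type_from_resource_uri := by
  intro resource_uri _
  unfold Spec_resolve_resource_type_from_resource_uri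
  unfold resolve_resource_type_from_resource_uri resolve_resource_type_from_resource_uri_alt
  generalize (PySem.Str.split? resource_uri "/").getD [] = l
  by_cases h8 : l.length < 8
  · simp only [if_pos h8]
  · simp only [if_neg h8]
    exact pv_core l h8
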